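-- pv_equiv track=rewrite | github.com/L1ghtDream/CloudFlightCodingContest | generic_drift/level4.py | compute_inverse
-- ===== SOURCE A (Python) =====
-- def compute_inverse(data, pair):
--     data = data[:]
--
--     xi = pair[0]
--     i = pair[1]
--     xj = pair[2]
--     j = pair[3]
--
--     if xi + xj == 1:
--         to_invert = []
--         for index in range(i, j):
--             to_invert.append(data[index])
--
--         inverted = list(reversed(to_invert))
--
--         for index in range(i, j):
--             data[index] = inverted[index - i] * -1
--
--         return data
--
--     if xi + xj == -1:
--         to_invert = []
--         for index in range(i+1, j+1):
--             to_invert.append(data[index])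
--
--         inverted = list(reversed(to_invert))
--
--         for index in range(i+1, j+1):
--             data[index] = inverted[index - i -1] * -1
--
--         return data
--
--     return []
-- ===== SOURCE B (Python) =====
-- def compute_inverse(data, pair):
--     xi, i, xj, j = pair[0], pair[1], pair[2], pair[3]
--     if xi + xj == 1:
--         lo, hi = i, j
--     elif xi + xj == -1:
--         lo, hi = i + 1, j + 1
--     else:
--         return []
--     out = data[:]
--     l, r = lo, hi - 1
--     while l < r:
--         out[l], out[r] = -out[r], -out[l]
--         l += 1
--         r -= 1
--     if l == r:
--         out[l] = -out[l]
--     return out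
-- ===== Notes on version B (the rewrite author's own statement) =====
-- stated objective: simpler
-- what changed: A's two near-duplicate branches that build the segment, reverse it into an auxiliary list and write it back forward are unified into one bounds computation followed by an in-place two-pointer reverse-and-negate (swap -out[r]/-out[l] moving inward, negating a lone middle element), with no auxiliary reversed list.
-- outside the precondition, e.g. on compute_inverse([1, 8, -7, -8], [1, -4, -2, 2]): A returns [8, 7, -8, -1], B returns [8, 8, -7, -1]
import Mathlib
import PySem

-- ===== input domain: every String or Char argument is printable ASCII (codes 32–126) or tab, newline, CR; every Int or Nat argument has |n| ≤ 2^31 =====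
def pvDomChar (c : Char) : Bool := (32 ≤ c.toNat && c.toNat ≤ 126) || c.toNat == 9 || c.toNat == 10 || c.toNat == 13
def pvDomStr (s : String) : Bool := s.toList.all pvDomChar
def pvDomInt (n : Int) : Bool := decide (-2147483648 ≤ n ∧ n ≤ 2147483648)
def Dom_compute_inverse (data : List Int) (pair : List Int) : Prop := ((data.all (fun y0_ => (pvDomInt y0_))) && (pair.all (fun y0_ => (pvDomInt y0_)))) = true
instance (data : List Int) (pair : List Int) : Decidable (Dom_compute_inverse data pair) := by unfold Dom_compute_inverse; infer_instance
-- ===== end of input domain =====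

-- B replaces A's two near-identical build-reverse-then-write-forward branches by one in-place
-- two-pointer reverse-and-negate of the selected segment (objective: simpler decomposition).
-- Neither program mutates its arguments (A and B both copy `data` first).

-- ===== PORT A =====
def compute_inverse (data : List Int) (pair : List Int) : List Int :=
  -- data = data[:] is a copy; we work on the immutable list directly
  let xi := PySem.List.pyGetD pair 0 0
  let i  := PySem.List.pyGetD pair 1 0
  let xj := PySem.List.pyGetD pair 2 0
  let j  := PySem.List.pyGetD pair 3 0
  if xi + xj = 1 then
    let to_invert := (PySem.List.pyRange i j).foldl
      (fun acc index => acc ++ [PySem.List.pyGetD data index 0]) []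
    let inverted := to_invert.reverse
    (PySem.List.pyRange i j).foldl
      (fun d index => PySem.List.pySetD d index (PySem.List.pyGetD inverted (index - i) 0 * -1)) data
  else if xi + xj = -1 then
    let to_invert := (PySem.List.pyRange (i + 1) (j + 1)).foldl
      (fun acc index => acc ++ [PySem.List.pyGetD data index 0]) []
    let inverted := to_invert.reverse
    (PySem.List.pyRange (i + 1) (j + 1)).foldl
      (fun d index => PySem.List.pySetD d index (PySem.List.pyGetD inverted (index - i - 1) 0 * -1)) data
  else []

-- ===== PORT B =====
-- while l < r: out[l], out[r] = -out[r], -out[l]; l += 1; r -= 1;  then if l == r: out[l] = -out[l]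
def revNegLoop (out : List Int) (l r : Int) : List Int :=
  if l < r then
    revNegLoop
      (PySem.List.pySetD (PySem.List.pySetD out l (-(PySem.List.pyGetD out r 0)))
        r (-(PySem.List.pyGetD out l 0)))
      (l + 1) (r - 1)
  else if l = r then
    PySem.List.pySetD out l (-(PySem.List.pyGetD out l 0))
  else out
termination_by (r - l).toNat
decreasing_by omega

def compute_inverse_alt (data : List Int) (pair : List Int) : List Int :=
  let xi := PySem.List.pyGetD pair 0 0
  let i  := PySem.List.pyGetD pair 1 0
  let xj := PySem.List.pyGetD pair 2 0
  let j  := PySem.List.pyGetD pair 3 0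
  if xi + xj = 1 then revNegLoop data i (j - 1)          -- lo = i,   hi = j;   l = lo, r = hi-1
  else if xi + xj = -1 then revNegLoop data (i + 1) j    -- lo = i+1, hi = j+1; l = lo, r = hi-1
  else []

-- ===== PRECONDITION & SPEC =====
-- Pre_ excludes pairs shorter than 4 entries and active segments reaching outside [0, len(data)):
-- past the end A raises IndexError, and on negative indices both programs silently wrap to
-- end-relative positions (A with overlapping writes) — an accident of Python negative indexing
-- that no caller would rely on and on which the two accidental results differ.
def Pre_compute_inverse (data : List Int) (pair : List Int) : Prop :=
  4 ≤ pair.length ∧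
  (PySem.List.pyGetD pair 0 0 + PySem.List.pyGetD pair 2 0 = 1 →
    (PySem.List.pyGetD pair 3 0 ≤ PySem.List.pyGetD pair 1 0 ∨
     (0 ≤ PySem.List.pyGetD pair 1 0 ∧ PySem.List.pyGetD pair 3 0 ≤ (data.length : Int)))) ∧
  (PySem.List.pyGetD pair 0 0 + PySem.List.pyGetD pair 2 0 = -1 →
    (PySem.List.pyGetD pair 3 0 ≤ PySem.List.pyGetD pair 1 0 ∨
     (0 ≤ PySem.List.pyGetD pair 1 0 + 1 ∧ PySem.List.pyGetD pair 3 0 + 1 ≤ (data.length : Int))))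
instance (data : List Int) (pair : List Int) : Decidable (Pre_compute_inverse data pair) := by
  unfold Pre_compute_inverse; infer_instance

def pvWitness_compute_inverse : List Int × List Int := ([1, 2, 3], [0, 1, 1, 3])

def Spec_compute_inverse (data : List Int) (pair : List Int) (out : List Int) : Prop := out = compute_inverse_alt data pair
instance (data : List Int) (pair : List Int) (out : List Int) : Decidable (Spec_compute_inverse data pair out) := by unfold Spec_compute_inverse; infer_instance

-- ===== CLAIM (what is proved, stated in full; the proofs are below) =====
def Claim_equal_compute_inverse : Prop := ∀ (data : List Int) (pair : List Int), Dom_compute_inverse data pair → Pre_compute_inverse data pair → Spec_compute_inverse data pair (compute_inverse data pair)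

-- ===== LEMMAS AND PROOFS =====

-- fold of pySetD over any index list preserves length
lemma length_foldl_pySetD (g : Int → Int) (l : List Int) (d0 : List Int) :
    (l.foldl (fun d idx => PySem.List.pySetD d idx (g idx)) d0).length = d0.length := by
  induction l generalizing d0 with
  | nil => rfl
  | cons a t ih => simp [List.foldl, ih, PySem.List.length_pySetD]

-- fold of pySetD over range(a,b): elementwise description
lemma foldl_pySetD_getD (n : Nat) (a : Int) (g : Int → Int) :
    ∀ (b : Int) (d0 : List Int), 0 ≤ a → b ≤ (d0.length : Int) → (b - a).toNat = n →
    ∀ (k : Nat), k < d0.length →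
      ((PySem.List.pyRange a b).foldl (fun d idx => PySem.List.pySetD d idx (g idx)) d0).getD k 0
        = if a ≤ (k : Int) ∧ (k : Int) < b then g k else d0.getD k 0 := by
  induction n with
  | zero =>
    intro b d0 ha hb hn k hk
    rw [PySem.List.pyRange_one_eq_nil (by omega)]
    simp only [List.foldl_nil]
    split_ifs with h
    · omega
    · rfl
  | succ m ih =>
    intro b d0 ha hb hn k hk
    have hab : a < b := by omega
    have hb1 : b = (b - 1) + 1 := by ring
    rw [hb1, PySem.List.pyRange_one_succ_right (by omega), List.foldl_append]
    simp only [List.foldl_cons, List.foldl_nil]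
    set prev := (PySem.List.pyRange a (b - 1)).foldl
      (fun d idx => PySem.List.pySetD d idx (g idx)) d0 with hprev
    have hlen : prev.length = d0.length := length_foldl_pySetD g _ d0
    rw [PySem.List.pySetD_of_nonneg _ _ (by omega)]
    rw [List.getD_eq_getElem?_getD, List.getElem?_set]
    by_cases hkb : (b - 1).toNat = k
    · have hlt' : (b - 1).toNat < prev.length := by omega
      rw [if_pos hkb, if_pos hlt', Option.getD_some,
        if_pos (show a ≤ (k : Int) ∧ (k : Int) < b - 1 + 1 by omega)]
      congr 1
      omega
    · rw [if_neg hkb, ← List.getD_eq_getElem?_getD]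
      rw [ih (b - 1) d0 ha (by omega) (by omega) k hk]
      have : (k : Int) ≠ b - 1 := by omega
      split_ifs with h1 h2 h2 <;> first | rfl | omega

-- revNegLoop: elementwise description (reverse-and-negate of positions l..r)
lemma revNegLoop_getD (out : List Int) (l r : Int) :
    0 ≤ l → r < (out.length : Int) →
    (revNegLoop out l r).length = out.length ∧
    ∀ (k : Nat), k < out.length →
      (revNegLoop out l r).getD k 0
        = if l ≤ (k : Int) ∧ (k : Int) ≤ r then -(out.getD (l + r - k).toNat 0)
          else out.getD k 0 := by
  induction out, l, r using revNegLoop.induct with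
  | case1 out l r hlr ih =>
    intro hl hr
    set out' := PySem.List.pySetD (PySem.List.pySetD out l (-(PySem.List.pyGetD out r 0)))
      r (-(PySem.List.pyGetD out l 0)) with hout'
    have hlen' : out'.length = out.length := by
      simp [hout', PySem.List.length_pySetD]
    have hr0 : (0:Int) ≤ r := by omega
    obtain ⟨ihlen, ihget⟩ := ih (by omega) (by omega)
    -- description of out'
    have hset : ∀ (m : Nat), m < out.length →
        out'.getD m 0 = if (m : Int) = r then -(out.getD l.toNat 0)
          else if (m : Int) = l then -(out.getD r.toNat 0) else out.getD m 0 := by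
      intro m hm
      rw [hout', PySem.List.pySetD_of_nonneg _ _ hr0, PySem.List.pySetD_of_nonneg _ _ hl]
      rw [PySem.List.pyGetD_of_nonneg _ _ hr0, PySem.List.pyGetD_of_nonneg _ _ hl]
      rw [List.getD_eq_getElem?_getD, List.getElem?_set]
      by_cases h1 : r.toNat = m
      · rw [if_pos h1]
        simp only [List.length_set]
        rw [if_pos (by omega)]
        rw [if_pos (by omega)]
        rfl
      · rw [if_neg h1, List.getElem?_set]
        by_cases h2 : l.toNat = m
        · rw [if_pos h2, if_pos (by omega)]
          rw [if_neg (by omega), if_pos (by omega)]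
          rfl
        · rw [if_neg h2, ← List.getD_eq_getElem?_getD]
          rw [if_neg (by omega), if_neg (by omega)]
      -- end hset
    constructor
    · rw [revNegLoop, if_pos hlr, ← hout', ihlen, hlen']
    · intro k hk
      rw [revNegLoop, if_pos hlr, ← hout']
      rw [ihget k (by omega)]
      by_cases hin : l + 1 ≤ (k : Int) ∧ (k : Int) ≤ r - 1
      · rw [if_pos hin, if_pos (by omega)]
        have hidx : (l + 1 + (r - 1) - k) = l + r - k := by ring
        rw [hidx]
        have hmem : (l + r - k).toNat < out.length := by omega
        rw [hset _ (by omega)]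
        rw [if_neg (by omega), if_neg (by omega)]
      · rw [if_neg hin]
        by_cases hkl : (k : Int) = l
        · rw [hset k hk, if_neg (by omega), if_pos hkl, if_pos (by omega)]
          have : (l + r - k).toNat = r.toNat := by omega
          rw [this]
        · by_cases hkr : (k : Int) = r
          · rw [hset k hk, if_pos hkr, if_pos (by omega)]
            have : (l + r - k).toNat = l.toNat := by omega
            rw [this]
          · rw [hset k hk, if_neg hkr, if_neg (by omega), if_neg (by omega)]
  | case2 out r hlr =>
    intro hl hr
    constructor
    · rw [revNegLoop, if_neg hlr, if_pos rfl]
      simp [PySem.List.length_pySetD]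
    · intro k hk
      rw [revNegLoop, if_neg hlr, if_pos rfl]
      rw [PySem.List.pySetD_of_nonneg _ _ hl, PySem.List.pyGetD_of_nonneg _ _ hl]
      rw [List.getD_eq_getElem?_getD, List.getElem?_set]
      by_cases h1 : r.toNat = k
      · rw [if_pos h1, if_pos (by omega), if_pos (by omega)]
        have : (r + r - k).toNat = r.toNat := by omega
        rw [this]
        rfl
      · rw [if_neg h1, ← List.getD_eq_getElem?_getD, if_neg (by omega)]
  | case3 out l r hlr hne =>
    intro hl hr
    constructor
    · rw [revNegLoop, if_neg hlr, if_neg hne]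
    · intro k hk
      rw [revNegLoop, if_neg hlr, if_neg hne]
      rw [if_neg (by omega)]

lemma revNegLoop_of_lt (out : List Int) (l r : Int) (h : r < l) : revNegLoop out l r = out := by
  rw [revNegLoop, if_neg (by omega), if_neg (by omega)]

-- A's 'inverted' list, read at index idx - lo, is the mirrored original element
lemma inverted_getD (data : List Int) (lo hi idx : Int) (h0 : 0 ≤ lo)
    (_hhi : hi ≤ (data.length : Int)) (h1 : lo ≤ idx) (h2 : idx < hi) :
    PySem.List.pyGetD
      (((PySem.List.pyRange lo hi).foldl
          (fun acc index => acc ++ [PySem.List.pyGetD data index 0]) []).reverse)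
      (idx - lo) 0
      = data.getD (lo + hi - 1 - idx).toNat 0 := by
  rw [PySem.List.foldl_append_singleton_eq_map]
  simp only [List.nil_append]
  have hlenr : ((PySem.List.pyRange lo hi).map
      (fun index => PySem.List.pyGetD data index 0)).reverse.length = (hi - lo).toNat := by
    simp [PySem.List.length_pyRange_one]
  rw [PySem.List.pyGetD_eq_getElem _ _ (by omega) (by omega)]
  rw [List.getElem_reverse]
  rw [List.getElem_map]
  rw [PySem.List.getElem_pyRange_one]
  have harg : lo + ↑(((PySem.List.pyRange lo hi).map
        (fun index => PySem.List.pyGetD data index 0)).length - 1 - (idx - lo).toNat)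
      = lo + hi - 1 - idx := by
    simp only [List.length_map, PySem.List.length_pyRange_one]
    omega
  rw [harg]
  rw [PySem.List.pyGetD_of_nonneg _ _ (by omega)]

lemma ext_getD (l1 l2 : List Int) (hlen : l1.length = l2.length)
    (h : ∀ k, k < l1.length → l1.getD k 0 = l2.getD k 0) : l1 = l2 := by
  apply List.ext_getElem hlen
  intro i h1 h2
  have := h i h1
  rwa [List.getD_eq_getElem _ _ h1, List.getD_eq_getElem _ _ h2] at this

-- the common segment case: A's branch body equals B's two-pointer loop on segment [lo, hi)
lemma branch_eq (data : List Int) (lo hi : Int) (h0 : 0 ≤ lo) (hhi : hi ≤ (data.length : Int))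
    (_hlt : lo < hi) :
    (PySem.List.pyRange lo hi).foldl
      (fun d index => PySem.List.pySetD d index
        (PySem.List.pyGetD
          (((PySem.List.pyRange lo hi).foldl
              (fun acc index => acc ++ [PySem.List.pyGetD data index 0]) []).reverse)
          (index - lo) 0 * -1)) data
    = revNegLoop data lo (hi - 1) := by
  obtain ⟨blen, bget⟩ := revNegLoop_getD data lo (hi - 1) h0 (by omega)
  apply ext_getD
  · rw [length_foldl_pySetD, blen]
  · intro k hk
    rw [length_foldl_pySetD] at hk
    rw [foldl_pySetD_getD (hi - lo).toNat lo _ hi data h0 hhi rfl k hk]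
    rw [bget k hk]
    by_cases hin : lo ≤ (k : Int) ∧ (k : Int) < hi
    · rw [if_pos hin, if_pos (by omega)]
      rw [inverted_getD data lo hi k h0 hhi (by omega) (by omega)]
      have : lo + (hi - 1) - k = lo + hi - 1 - k := by ring
      rw [this]
      ring
    · rw [if_neg hin, if_neg (by omega)]

-- ===== VERDICT (by name: the statement is the Claim_ definition above) =====
theorem compute_inverse_spec : Claim_equal_compute_inverse := by
  intro data pair _ hpre
  obtain ⟨hlen4, hpre1, hpre2⟩ := hpre
  unfold Spec_compute_inverse compute_inverse compute_inverse_alt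
  set xi := PySem.List.pyGetD pair 0 0
  set i := PySem.List.pyGetD pair 1 0
  set xj := PySem.List.pyGetD pair 2 0
  set j := PySem.List.pyGetD pair 3 0
  by_cases h1 : xi + xj = 1
  · simp only [if_pos h1]
    rcases hpre1 h1 with hji | ⟨hi0, hjlen⟩
    · by_cases hlt : i < j
      · -- j ≤ i and i < j impossible
        omega
      · rw [PySem.List.pyRange_one_eq_nil (by omega)]
        simp only [List.foldl_nil]
        rw [revNegLoop_of_lt data i (j - 1) (by omega)]
    · by_cases hlt : i < j
      · exact branch_eq data i j hi0 hjlen hlt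
      · rw [PySem.List.pyRange_one_eq_nil (by omega)]
        simp only [List.foldl_nil]
        rw [revNegLoop_of_lt data i (j - 1) (by omega)]
  · simp only [if_neg h1]
    by_cases h2 : xi + xj = -1
    · simp only [if_pos h2]
      have hrw : ∀ d : List Int, (PySem.List.pyRange (i + 1) (j + 1)).foldl
          (fun d' index => PySem.List.pySetD d' index
            (PySem.List.pyGetD
              (((PySem.List.pyRange (i + 1) (j + 1)).foldl
                  (fun acc index => acc ++ [PySem.List.pyGetD data index 0]) []).reverse)
              (index - i - 1) 0 * -1)) d
          = (PySem.List.pyRange (i + 1) (j + 1)).foldl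
          (fun d' index => PySem.List.pySetD d' index
            (PySem.List.pyGetD
              (((PySem.List.pyRange (i + 1) (j + 1)).foldl
                  (fun acc index => acc ++ [PySem.List.pyGetD data index 0]) []).reverse)
              (index - (i + 1)) 0 * -1)) d := by
        intro d
        congr 1
        funext d' index
        have : index - i - 1 = index - (i + 1) := by ring
        rw [this]
      rw [hrw]
      rcases hpre2 h2 with hji | ⟨hi0, hjlen⟩
      · by_cases hlt : i < j
        · omega
        · rw [PySem.List.pyRange_one_eq_nil (by omega)]
          simp only [List.foldl_nil]
          rw [revNegLoop_of_lt data (i + 1) j (by omega)]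
      · by_cases hlt : i < j
        · have := branch_eq data (i + 1) (j + 1) hi0 hjlen (by omega)
          have hj1 : j + 1 - 1 = j := by ring
          rw [hj1] at this
          exact this
        · rw [PySem.List.pyRange_one_eq_nil (by omega)]
          simp only [List.foldl_nil]
          rw [revNegLoop_of_lt data (i + 1) j (by omega)]
    · simp only [if_neg h2]
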